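-- pv_equiv track=rewrite | github.com/MarcusD9722/Nova | core/brain.py | _user_wants_code
-- ===== SOURCE A (Python) =====
-- def _user_wants_code(user_msg: str) -> bool:
--     q = (user_msg or "").lower()
--     triggers = (
--         "code",
--         "python",
--         "powershell",
--         "bash",
--         "script",
--         "snippet",
--         "regex",
--         "json",
--         "yaml",
--         "```",
--     )
--     return any(t in q for t in triggers)
-- ===== SOURCE B (Python) =====
-- def _user_wants_code(user_msg: str) -> bool:
--     # One left-to-right pass: at each position test whether any trigger starts there,
--     # instead of one full substring scan per trigger.
--     q = (user_msg or "").lower()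
--     triggers = ("code", "python", "powershell", "bash", "script",
--                 "snippet", "regex", "json", "yaml", "```")
--     for i in range(len(q) + 1):
--         if any(q.startswith(t, i) for t in triggers):
--             return True
--     return False
-- ===== Notes on version B (the rewrite author's own statement) =====
-- stated objective: alternative
-- what changed: Replaces per-trigger substring-membership tests (one full scan of the string for each trigger) by a single left-to-right scan over the positions of the string, testing at each position whether some trigger starts there.
import Mathlib
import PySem

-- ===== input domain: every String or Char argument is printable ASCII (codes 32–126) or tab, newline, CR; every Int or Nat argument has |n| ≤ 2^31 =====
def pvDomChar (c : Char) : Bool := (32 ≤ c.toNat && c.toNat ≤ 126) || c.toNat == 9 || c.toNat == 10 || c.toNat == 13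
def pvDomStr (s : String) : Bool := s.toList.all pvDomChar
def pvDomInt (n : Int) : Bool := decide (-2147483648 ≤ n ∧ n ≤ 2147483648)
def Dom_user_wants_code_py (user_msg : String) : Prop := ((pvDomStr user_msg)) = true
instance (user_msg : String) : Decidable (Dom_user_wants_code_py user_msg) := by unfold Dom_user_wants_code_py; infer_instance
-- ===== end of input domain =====

-- B replaces per-trigger substring scans by one position scan checking trigger prefixes; alternative structure, same cost.
-- ===== PORT A =====
def pvTriggers : List String :=
  ["code", "python", "powershell", "bash", "script", "snippet", "regex", "json", "yaml", "```"]

def user_wants_code_py (user_msg : String) : Bool :=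
  let q := PySem.Str.lower user_msg
  pvTriggers.any (fun t => PySem.Str.isIn t q)

-- ===== PORT B =====
-- Source B's trigger tuple, as char lists (the level the scan works on)
def pvTriggersB : List (List Char) :=
  ["code".toList, "python".toList, "powershell".toList, "bash".toList, "script".toList,
   "snippet".toList, "regex".toList, "json".toList, "yaml".toList, "```".toList]

-- Source B's loop: at each position (suffix) test whether some trigger starts there
def pvScan (l : List Char) : Bool :=
  match l with
  | [] => pvTriggersB.any (fun t => t.isPrefixOf [])
  | _ :: rest => pvTriggersB.any (fun t => t.isPrefixOf l) || pvScan rest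

def user_wants_code_py_alt (user_msg : String) : Bool :=
  pvScan (PySem.Str.lower user_msg).toList

-- ===== PRECONDITION & SPEC =====
def Spec_user_wants_code_py (user_msg : String) (out : Bool) : Prop := out = user_wants_code_py_alt user_msg
instance (user_msg : String) (out : Bool) : Decidable (Spec_user_wants_code_py user_msg out) := by unfold Spec_user_wants_code_py; infer_instance

-- ===== CLAIM (what is proved, stated in full; the proofs are below) =====
def Claim_equal_user_wants_code_py : Prop := ∀ (user_msg : String), Dom_user_wants_code_py user_msg → Spec_user_wants_code_py user_msg (user_wants_code_py user_msg)

-- ===== LEMMAS AND PROOFS =====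
theorem pvTriggersB_eq : pvTriggersB = pvTriggers.map String.toList := by decide

-- pvScan finds exactly the infix triggers
theorem pvScan_iff (l : List Char) :
    pvScan l = true ↔ ∃ t ∈ pvTriggersB, t <:+: l := by
  induction l with
  | nil =>
      simp [pvScan, List.any_eq_true, List.isPrefixOf_iff_prefix]
  | cons c rest ih =>
      simp only [pvScan, Bool.or_eq_true, List.any_eq_true, List.isPrefixOf_iff_prefix, ih]
      constructor
      · rintro (⟨t, ht, hp⟩ | ⟨t, ht, hi⟩)
        · exact ⟨t, ht, hp.isInfix⟩
        · exact ⟨t, ht, hi.trans (List.infix_cons_iff.mpr (Or.inr List.infix_rfl))⟩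
      · rintro ⟨t, ht, hi⟩
        rcases List.infix_cons_iff.mp hi with hp | hi
        · exact Or.inl ⟨t, ht, hp⟩
        · exact Or.inr ⟨t, ht, hi⟩

-- ===== VERDICT (by name: the statement is the Claim_ definition above) =====
theorem user_wants_code_py_spec : Claim_equal_user_wants_code_py := by
  intro user_msg _
  unfold Spec_user_wants_code_py user_wants_code_py user_wants_code_py_alt
  rw [Bool.eq_iff_iff, pvScan_iff]
  simp only [List.any_eq_true, PySem.Str.isIn_iff_infix, pvTriggersB_eq, List.mem_map]
  constructor
  · rintro ⟨t, ht, hi⟩; exact ⟨t.toList, ⟨t, ht, rfl⟩, hi⟩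
  · rintro ⟨_, ⟨t, ht, rfl⟩, hi⟩; exact ⟨t, ht, hi⟩
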